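-- pv_equiv track=rewrite | github.com/Etriuus/Bioinfo | Lab6-Waofin.py | transform_sequence
-- ===== SOURCE A (Python) =====
-- def transform_sequence(start, target):
--     """Realiza una transformación paso a paso desde una secuencia inicial hasta
--     una secuencia objetivo.
--     Argumentos:
--         start: Secuencia inicial como lista.
--         target: Secuencia objetivo como lista.
--     Retorna:
--         Lista de pasos necesarios para transformar la secuencia inicial
--         en la final, con detalles de los intercambios realizados.
--     """
--     steps = []  # Almacena los pasos realizados
--     current = list(start)  # Copia la secuencia inicial
--     for i in range(len(current)):
--         if current[i] != target[i]:  # Verificar si hay una discrepancia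
--             steps.append((current.copy(), f"Intercambiar {current[i]} con {target[i]}"))
--             current[i] = target[i]  # Realizar el cambio
--     return steps
-- ===== SOURCE B (Python) =====
-- def transform_sequence(start, target):
--     """Recursive decomposition: walk the two sequences head-by-head, carrying
--     the already-transformed prefix; each snapshot is prefix + remaining start."""
--     def go(pre, s, t):
--         if not s:
--             return []
--         s0 = s[0]
--         t0 = t[0]  # IndexError here when target is shorter, as in A
--         rest = go(pre + [t0], s[1:], t[1:])
--         if s0 != t0:
--             return [(pre + s, f"Intercambiar {s0} con {t0}")] + rest
--         return rest
--     return go([], list(start), list(target))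
-- ===== Notes on version B (the rewrite author's own statement) =====
-- stated objective: alternative
-- what changed: B replaces A's index loop over a mutable running copy by structural recursion on the two sequences with an already-transformed-prefix accumulator; each snapshot is prefix + remaining start, no indexing or in-place update.
import Mathlib
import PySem

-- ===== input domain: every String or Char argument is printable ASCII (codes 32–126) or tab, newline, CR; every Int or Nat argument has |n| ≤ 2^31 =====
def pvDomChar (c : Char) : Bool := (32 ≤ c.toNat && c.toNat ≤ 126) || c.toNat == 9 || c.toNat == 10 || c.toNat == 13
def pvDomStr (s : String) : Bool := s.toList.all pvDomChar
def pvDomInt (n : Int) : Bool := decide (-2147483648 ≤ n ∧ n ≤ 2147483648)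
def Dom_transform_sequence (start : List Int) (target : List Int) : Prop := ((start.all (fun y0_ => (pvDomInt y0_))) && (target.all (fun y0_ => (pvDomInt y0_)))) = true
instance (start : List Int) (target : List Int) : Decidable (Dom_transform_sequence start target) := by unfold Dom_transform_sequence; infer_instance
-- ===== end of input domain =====

-- B replaces A's index loop over a mutable running copy by structural recursion on the
-- two sequences with a transformed-prefix accumulator (objective: alternative decomposition).
-- ===== PORT A =====
def transform_sequence (start : List Int) (target : List Int) : List (List Int × String) :=
  ((List.range start.length).foldl (fun (st : List (List Int × String) × List Int) i =>
      let c := st.2.getD i 0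
      let t := target.getD i 0
      if c ≠ t then
        (st.1 ++ [(st.2, "Intercambiar " ++ PySem.Int.toStr c ++ " con " ++ PySem.Int.toStr t)],
         st.2.set i t)
      else st)
    ([], start)).1

-- ===== PORT B =====
-- go pre s t: Python's recursive helper; the branch where t is exhausted first is the
-- IndexError case (excluded by Pre_), the port returns [] there.
def tsGo (pre : List Int) : List Int → List Int → List (List Int × String)
  | [], _ => []
  | _ :: _, [] => []
  | s0 :: s, t0 :: t =>
      let rest := tsGo (pre ++ [t0]) s t
      if s0 ≠ t0 then
        (pre ++ s0 :: s, "Intercambiar " ++ PySem.Int.toStr s0 ++ " con " ++ PySem.Int.toStr t0) :: rest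
      else rest

def transform_sequence_alt (start : List Int) (target : List Int) : List (List Int × String) :=
  tsGo [] start target

-- ===== PRECONDITION & SPEC =====
-- Pre_ excludes exactly the inputs where A raises IndexError: target shorter than start.
def Pre_transform_sequence (start : List Int) (target : List Int) : Prop :=
  start.length ≤ target.length
instance (start : List Int) (target : List Int) : Decidable (Pre_transform_sequence start target) := by
  unfold Pre_transform_sequence; infer_instance
def pvWitness_transform_sequence : List Int × List Int := ([1, 2, 3], [1, 5, 3])
def Spec_transform_sequence (start : List Int) (target : List Int) (out : List (List Int × String)) : Prop := out = transform_sequence_alt start target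
instance (start : List Int) (target : List Int) (out : List (List Int × String)) : Decidable (Spec_transform_sequence start target out) := by unfold Spec_transform_sequence; infer_instance

-- ===== CLAIM (what is proved, stated in full; the proofs are below) =====
def Claim_equal_transform_sequence : Prop := ∀ (start : List Int) (target : List Int), Dom_transform_sequence start target → Pre_transform_sequence start target → Spec_transform_sequence start target (transform_sequence start target)

-- ===== LEMMAS AND PROOFS =====

-- A's fold reaches, after the first i iterations, steps = the mismatch snapshots among
-- indices < i and current = target.take i ++ start.drop i.
theorem fold_invariant (start target : List Int) (h : start.length ≤ target.length) :
    ∀ i, i ≤ start.length →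
      ((List.range i).foldl (fun (st : List (List Int × String) × List Int) i =>
          let c := st.2.getD i 0
          let t := target.getD i 0
          if c ≠ t then
            (st.1 ++ [(st.2, "Intercambiar " ++ PySem.Int.toStr c ++ " con " ++ PySem.Int.toStr t)],
             st.2.set i t)
          else st)
        ([], start))
      = ((List.range i).filterMap (fun i =>
          let s := start.getD i 0
          let t := target.getD i 0
          if s ≠ t then
            some (target.take i ++ start.drop i,
                  "Intercambiar " ++ PySem.Int.toStr s ++ " con " ++ PySem.Int.toStr t)
          else none),
         target.take i ++ start.drop i) := by
  intro i hi
  induction i with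
  | zero => simp
  | succ k ih =>
    have hk : k ≤ start.length := Nat.le_of_succ_le hi
    have hk' : k < start.length := hi
    have hkt : k < target.length := lt_of_lt_of_le hk' h
    have hlen : (target.take k).length = k := by
      simp [Nat.min_eq_left (le_of_lt hkt)]
    have hdrop : start.drop k = start[k] :: start.drop (k + 1) :=
      List.drop_eq_getElem_cons hk'
    have hcur_get : (target.take k ++ start.drop k).getD k 0 = start.getD k 0 := by
      rw [List.getD, List.getD, List.getElem?_append_right (by omega),
          hlen, Nat.sub_self, hdrop]
      simp [List.getElem?_eq_getElem hk']
    have htake : target.take (k + 1) = target.take k ++ [target[k]] := by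
      rw [List.take_add_one]
      simp [List.getElem?_eq_getElem hkt]
    have htget : target.getD k 0 = target[k] := by
      simp [List.getD, List.getElem?_eq_getElem hkt]
    have hset : (target.take k ++ start.drop k).set k (target.getD k 0)
        = target.take (k + 1) ++ start.drop (k + 1) := by
      rw [List.set_append, hlen, if_neg (lt_irrefl k), Nat.sub_self, hdrop, htake,
          htget, List.set_cons_zero, List.append_cons]
    have heq : start.getD k 0 = target.getD k 0 → target.take k ++ start.drop k
        = target.take (k + 1) ++ start.drop (k + 1) := by
      intro he
      have hs : start[k] = target[k] := by
        simpa [List.getD, List.getElem?_eq_getElem hk',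
               List.getElem?_eq_getElem hkt] using he
      rw [htake, hdrop, hs, List.append_cons]
    rw [List.range_succ, List.foldl_append, List.filterMap_append, ih hk]
    simp only [List.foldl_cons, List.foldl_nil, List.filterMap_cons, List.filterMap_nil]
    have hcg := hcur_get
    simp only [List.getD_eq_getElem?_getD] at hcg
    by_cases hne : start.getD k 0 = target.getD k 0
    · have hne2 := hne
      simp only [List.getD_eq_getElem?_getD] at hne2
      simp [hcg, hne2, ← heq hne]
    · have hne2 := hne
      have hs2 := hset
      simp only [List.getD_eq_getElem?_getD] at hne2 hs2
      simp [hcg, hne2, hs2]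

-- B's recursion computes the same index-wise characterization.
theorem tsGo_eq (s : List Int) : ∀ (t pre : List Int), s.length ≤ t.length →
    tsGo pre s t = (List.range s.length).filterMap (fun i =>
      if s.getD i 0 ≠ t.getD i 0 then
        some (pre ++ (t.take i ++ s.drop i),
              "Intercambiar " ++ PySem.Int.toStr (s.getD i 0) ++ " con " ++ PySem.Int.toStr (t.getD i 0))
      else none) := by
  induction s with
  | nil => intro t pre _; simp [tsGo]
  | cons s0 s ih =>
    intro t pre h
    cases t with
    | nil => simp at h
    | cons t0 t =>
      have h' : s.length ≤ t.length := by simpa using h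
      rw [show (s0 :: s).length = s.length + 1 from rfl,
          List.range_succ_eq_map, List.filterMap_cons, List.filterMap_map]
      simp only [tsGo, ih t (pre ++ [t0]) h']
      by_cases hne : s0 = t0
      · simp [hne, Function.comp, List.take_succ_cons,
              List.drop_succ_cons, List.append_assoc]
      · simp [hne, Function.comp, List.take_succ_cons,
              List.drop_succ_cons, List.append_assoc]

-- ===== VERDICT (by name: the statement is the Claim_ definition above) =====
theorem transform_sequence_spec : Claim_equal_transform_sequence := by
  intro start target _ hpre
  unfold Spec_transform_sequence transform_sequence transform_sequence_alt
  rw [fold_invariant start target hpre start.length le_rfl,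
      tsGo_eq start target [] hpre]
  simp
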